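-- pv_equiv track=rewrite | github.com/xowhddk123/Algorithm_Study | 03.nearnum.py | solution
-- ===== SOURCE A (Python) =====
-- def solution(array, n):
--     lst = []
--     array = sorted(list(array))
--     for i in array:
--         lst.append(abs(n-i))
--         idx = lst.index(min(lst))
--         answer = array[idx]
--     return answer
-- ===== SOURCE B (Python) =====
-- def solution(array, n):
--     # Single O(len(array)) pass: keep the element whose (|n-x|, x) key is lexicographically
--     # smallest -- no sort, no repeated min/index scans.
--     best = array[0]
--     for x in array[1:]:
--         d, bd = abs(n - x), abs(n - best)
--         if d < bd or (d == bd and x < best):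
--             best = x
--     return best
-- ===== Notes on version B (the rewrite author's own statement) =====
-- stated objective: faster
-- what changed: A sorts the array and on every iteration rescans the growing distance list with min() and list.index(); B is a single linear pass keeping the element with the lexicographically smallest (|n-x|, x) key, which reproduces A's sorted-order tie-breaking (smaller value wins ties) without sorting or inner scans.
-- outside the precondition, e.g. on solution([], 5): A raises NameError, B raises IndexError
import Mathlib
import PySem

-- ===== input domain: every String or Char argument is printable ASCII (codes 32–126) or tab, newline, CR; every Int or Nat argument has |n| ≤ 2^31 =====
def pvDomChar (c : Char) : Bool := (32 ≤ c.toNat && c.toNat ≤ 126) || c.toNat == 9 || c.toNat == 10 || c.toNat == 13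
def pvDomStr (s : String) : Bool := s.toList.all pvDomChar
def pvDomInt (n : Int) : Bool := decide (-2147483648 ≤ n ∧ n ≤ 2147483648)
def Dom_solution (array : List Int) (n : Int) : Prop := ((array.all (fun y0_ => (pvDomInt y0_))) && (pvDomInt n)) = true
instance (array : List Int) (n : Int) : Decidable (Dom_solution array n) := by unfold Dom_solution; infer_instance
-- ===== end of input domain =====

-- B replaces A's sort + per-iteration min()/index() rescans by one linear pass keeping the
-- element with the lexicographically smallest key (|n-x|, x); objective: faster.

-- ===== PORT A =====
-- literal transliteration of A: sort the array, then for each element append |n-i| to lst,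
-- take the first index of min(lst) and set answer = sorted array at that index.
def solution (array : List Int) (n : Int) : Int :=
  let s := PySem.List.sorted array (fun x => x) false
  (s.foldl (fun (st : List Int × Int) i =>
      let lst := st.1 ++ [|n - i|]
      let idx := (PySem.List.index? lst ((PySem.List.min? lst (fun x => x)).getD 0)).getD 0
      (lst, (PySem.List.pyGet? s (idx : Int)).getD 0))
    ([], 0)).2

-- ===== PORT B =====
def solution_alt (array : List Int) (n : Int) : Int :=
  match array with
  | [] => 0   -- unreachable under Pre_: Python B raises IndexError on []
  | b :: rest =>
      rest.foldl (fun best x =>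
        if |n - x| < |n - best| ∨ (|n - x| = |n - best| ∧ x < best) then x else best) b

-- ===== PRECONDITION & SPEC =====
-- Pre_ excludes only the empty list, on which A raises NameError (answer never assigned)
-- and B raises IndexError.
def Pre_solution (array : List Int) (n : Int) : Prop := array ≠ []
instance (array : List Int) (n : Int) : Decidable (Pre_solution array n) := by unfold Pre_solution; infer_instance

def pvWitness_solution : List Int × Int := ([3, -1, 7], 2)

def Spec_solution (array : List Int) (n : Int) (out : Int) : Prop := out = solution_alt array n
instance (array : List Int) (n : Int) (out : Int) : Decidable (Spec_solution array n out) := by unfold Spec_solution; infer_instance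

-- ===== CLAIM (what is proved, stated in full; the proofs are below) =====
def Claim_equal_solution : Prop := ∀ (array : List Int) (n : Int), Dom_solution array n → Pre_solution array n → Spec_solution array n (solution array n)

-- ===== LEMMAS AND PROOFS =====

-- the strict lexicographic key order both programs minimise: (|n-a|, a) < (|n-b|, b)
def pvLtKey (n a b : Int) : Prop := |n - a| < |n - b| ∨ (|n - a| = |n - b| ∧ a < b)

theorem pvLtKey_antisym {n a b : Int} (h1 : ¬ pvLtKey n a b) (h2 : ¬ pvLtKey n b a) : a = b := by
  unfold pvLtKey at h1 h2
  omega

-- B's fold returns an element of b :: rest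
theorem foldB_mem (n : Int) : ∀ (l : List Int) (b : Int),
    (l.foldl (fun best x =>
      if |n - x| < |n - best| ∨ (|n - x| = |n - best| ∧ x < best) then x else best) b) ∈ b :: l := by
  intro l
  induction l with
  | nil => intro b; simp
  | cons x t ih =>
      intro b
      simp only [List.foldl_cons, List.mem_cons]
      by_cases h : |n - x| < |n - b| ∨ (|n - x| = |n - b| ∧ x < b)
      · simp only [if_pos h]
        rcases List.mem_cons.mp (ih x) with h' | h'
        · right; left; exact h'
        · right; right; exact h'
      · simp only [if_neg h]
        rcases List.mem_cons.mp (ih b) with h' | h'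
        · left; exact h'
        · right; right; exact h'

-- B's fold returns a key-minimal element of b :: rest
theorem foldB_min (n : Int) : ∀ (l : List Int) (b : Int), ∀ y ∈ b :: l,
    ¬ pvLtKey n y (l.foldl (fun best x =>
      if |n - x| < |n - best| ∨ (|n - x| = |n - best| ∧ x < best) then x else best) b) := by
  intro l
  induction l with
  | nil =>
      intro b y hy
      simp only [List.mem_cons, List.not_mem_nil, or_false] at hy
      subst hy
      simp only [List.foldl_nil]
      unfold pvLtKey; omega
  | cons x t ih =>
      intro b y hy
      simp only [List.foldl_cons]
      simp only [List.mem_cons] at hy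
      by_cases h : |n - x| < |n - b| ∨ (|n - x| = |n - b| ∧ x < b)
      · simp only [if_pos h]
        rcases hy with rfl | heq | hy
        · -- y = b : if it beat the fold result, x would too (x's key is below b's)
          intro hc
          have hx := ih x x (by simp)
          unfold pvLtKey at hc hx
          omega
        · subst heq; exact ih y y (by simp)
        · exact ih x y (List.mem_cons_of_mem _ hy)
      · simp only [if_neg h]
        rcases hy with heqb | heq | hy
        · subst heqb; exact ih y y (by simp)
        · -- y = x : x's key is not below b's, and b's not below the result's
          subst heq
          intro hc
          have hb := ih b b (by simp)
          unfold pvLtKey at hc hb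
          omega
        · exact ih b y (List.mem_cons_of_mem _ hy)

-- A's fold: first component accumulates the distances, second is recomputed from the full list
theorem foldA_spec (s : List Int) (n : Int) : ∀ (l acc : List Int) (a0 : Int), l ≠ [] →
    (l.foldl (fun (st : List Int × Int) i =>
      let lst := st.1 ++ [|n - i|]
      let idx := (PySem.List.index? lst ((PySem.List.min? lst (fun x => x)).getD 0)).getD 0
      (lst, (PySem.List.pyGet? s (idx : Int)).getD 0)) (acc, a0))
    = (acc ++ l.map (fun i => |n - i|),
       (PySem.List.pyGet? s
         (((PySem.List.index? (acc ++ l.map (fun i => |n - i|))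
            ((PySem.List.min? (acc ++ l.map (fun i => |n - i|)) (fun x => x)).getD 0)).getD 0 : Nat) : Int)).getD 0) := by
  intro l
  induction l with
  | nil => intro acc a0 h; exact absurd rfl h
  | cons i t ih =>
      intro acc a0 _
      simp only [List.foldl_cons]
      by_cases ht : t = []
      · subst ht; simp
      · rw [ih (acc ++ [|n - i|]) _ ht]
        simp

-- the element A returns is key-minimal in the sorted list and belongs to it
theorem A_result_min (array : List Int) (n : Int) (h : array ≠ []) :
    solution array n ∈ array ∧ ∀ y ∈ array, ¬ pvLtKey n y (solution array n) := by
  set s := PySem.List.sorted array (fun x => x) false with hs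
  have hsne : s ≠ [] := by
    intro he
    exact h ((PySem.List.sorted_eq_nil_iff _ _ _).mp (hs ▸ he))
  have hperm : s.Perm array := hs ▸ PySem.List.sorted_perm array (fun x : Int => x) false
  have hsol : solution array n = (s.foldl (fun (st : List Int × Int) i =>
      let lst := st.1 ++ [|n - i|]
      let idx := (PySem.List.index? lst ((PySem.List.min? lst (fun x => x)).getD 0)).getD 0
      (lst, (PySem.List.pyGet? s (idx : Int)).getD 0)) ([], 0)).2 := by
    rw [hs]; rfl
  rw [hsol, foldA_spec s n s [] 0 hsne]
  simp only [List.nil_append]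
  set lst := s.map (fun i => |n - i|) with hlst
  have hlstne : lst ≠ [] := by simp [hlst, hsne]
  -- min? is some
  obtain ⟨m, hm⟩ : ∃ m, PySem.List.min? lst (fun x => x) = some m := by
    cases hmin : PySem.List.min? lst (fun x => x) with
    | none => exact absurd ((PySem.List.min?_eq_none_iff _ _).mp hmin) hlstne
    | some m => exact ⟨m, rfl⟩
  have hmmem : m ∈ lst := PySem.List.min?_mem hm
  have hmmin : ∀ y ∈ lst, m ≤ y := by
    intro y hy; exact PySem.List.min?_isMin hm y hy
  -- index? is some
  obtain ⟨k, hk⟩ : ∃ k, PySem.List.index? lst m = some k := by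
    have := (PySem.List.index?_isSome_iff lst m).mpr hmmem
    cases hidx : PySem.List.index? lst m with
    | none => rw [hidx] at this; simp at this
    | some k => exact ⟨k, rfl⟩
  obtain ⟨hklt, hkm, hkfirst⟩ := PySem.List.getElem_of_index?_eq_some hk
  have hkls : k < s.length := by simpa [hlst] using hklt
  rw [hm]
  simp only [Option.getD_some]
  rw [hk]
  simp only [Option.getD_some]
  rw [PySem.List.pyGet?_natCast s k]
  rw [List.getElem?_eq_getElem hkls]
  simp only [Option.getD_some]
  set z := s[k] with hz
  have hzm : |n - z| = m := by
    have : lst[k] = |n - z| := by simp [hlst, hz]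
    omega
  constructor
  · exact hperm.mem_iff.mp (List.getElem_mem hkls)
  · intro y hy
    have hys : y ∈ s := hperm.mem_iff.mpr hy
    have hfy : |n - y| ∈ lst := by
      simp only [hlst, List.mem_map]
      exact ⟨y, hys, rfl⟩
    have hle : m ≤ |n - y| := hmmin _ hfy
    intro hc
    unfold pvLtKey at hc
    rcases hc with hc | ⟨hc1, hc2⟩
    · omega
    · -- |n-y| = |n-z| and y < z : contradiction with sortedness + first index
      obtain ⟨j, hj, hjy⟩ := List.mem_iff_getElem.mp hys
      have hjl : j < lst.length := by simpa [hlst] using hj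
      have hlstj : lst[j] = m := by
        have : lst[j] = |n - s[j]| := by simp [hlst]
        rw [this, hjy]; omega
      have hkj : ¬ j < k := fun hlt => hkfirst j hlt hlstj
      have hmono : s[k]'hkls ≤ s[j]'hj :=
        PySem.List.sorted_id_getElem_mono array (p := k) (q := j) (by omega) hj
      have : z ≤ y := by rw [hz, ← hjy]; exact hmono
      omega

-- ===== VERDICT (by name: the statement is the Claim_ definition above) =====
theorem solution_spec : Claim_equal_solution := by
  intro array n _ hpre
  unfold Spec_solution
  obtain ⟨hamem, hamin⟩ := A_result_min array n hpre
  match array, hpre with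
  | b :: rest, _ =>
    unfold solution_alt
    set r := rest.foldl (fun best x =>
      if |n - x| < |n - best| ∨ (|n - x| = |n - best| ∧ x < best) then x else best) b with hr
    have hrmem : r ∈ b :: rest := hr ▸ foldB_mem n rest b
    have hrmin : ∀ y ∈ b :: rest, ¬ pvLtKey n y r := fun y hy => hr ▸ foldB_min n rest b y hy
    exact pvLtKey_antisym (hrmin _ hamem) (hamin _ hrmem)
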